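-- pv_equiv track=rewrite | github.com/russpenska/advent-of-code-2023 | 2/part1.py | maxPerColourForRounds
-- ===== SOURCE A (Python) =====
-- def maxPerColourForRounds(rounds):
--     maxes = {
--         'red': 0,
--         'green': 0,
--         'blue': 0
--     }
--     for round in rounds:
--         for pair in round:
--             count = pair[0]
--             colour = pair[1]
--
--             if maxes[colour] < count:
--                 maxes[colour] = count
--
--     return (maxes['red'], maxes['green'], maxes['blue'])
-- ===== SOURCE B (Python) =====
-- def maxPerColourForRounds(rounds):
--     counts = {'red': [0], 'green': [0], 'blue': [0]}
--     for round in rounds: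
--         for pair in round:
--             counts[pair[1]].append(pair[0])
--     return (max(counts['red']), max(counts['green']), max(counts['blue']))
-- ===== Notes on version B (the rewrite author's own statement) =====
-- stated objective: alternative
-- what changed: Instead of maintaining a running maximum per colour with a compare-and-overwrite inside the loop, B groups all counts into per-colour lists (seeded with 0) in one pass and takes max() of each list at the end.
-- outside the precondition, e.g. on maxPerColourForRounds([[(3, 'purple')]]): A raises KeyError, B raises KeyError
import Mathlib
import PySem

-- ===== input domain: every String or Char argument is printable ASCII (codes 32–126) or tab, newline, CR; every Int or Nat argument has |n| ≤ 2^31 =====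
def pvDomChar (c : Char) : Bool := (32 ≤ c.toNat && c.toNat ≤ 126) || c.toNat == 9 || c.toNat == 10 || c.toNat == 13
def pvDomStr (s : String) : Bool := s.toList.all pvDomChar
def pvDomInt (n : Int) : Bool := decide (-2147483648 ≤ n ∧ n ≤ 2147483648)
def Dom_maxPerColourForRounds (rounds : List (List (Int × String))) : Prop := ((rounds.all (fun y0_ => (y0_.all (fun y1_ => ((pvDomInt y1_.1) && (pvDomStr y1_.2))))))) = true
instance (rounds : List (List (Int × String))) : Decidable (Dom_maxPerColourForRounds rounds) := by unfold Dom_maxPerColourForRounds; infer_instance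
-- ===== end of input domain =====

-- B replaces A's in-loop compare-and-overwrite running maximum by grouping every count
-- into a per-colour list (seeded with 0) and taking max() of each list at the end; same cost.

-- ===== PORT A =====
def maxPerColourForRounds (rounds : List (List (Int × String))) : Int × Int × Int :=
  let maxes : PySem.Dict String Int :=
    PySem.Dict.ofList [("red", 0), ("green", 0), ("blue", 0)]
  let maxes := rounds.foldl (fun maxes round =>
    round.foldl (fun maxes pair =>
      let count := pair.1
      let colour := pair.2
      -- maxes[colour]: on Pre_ inputs the key is present, so getD is exact (KeyError excluded by Pre_)
      if maxes.getD colour 0 < count then maxes.insert colour count else maxes) maxes) maxes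
  (maxes.getD "red" 0, maxes.getD "green" 0, maxes.getD "blue" 0)

-- ===== PORT B =====
def maxPerColourForRounds_alt (rounds : List (List (Int × String))) : Int × Int × Int :=
  let counts : PySem.Dict String (List Int) :=
    PySem.Dict.ofList [("red", [0]), ("green", [0]), ("blue", [0])]
  let counts := rounds.foldl (fun counts round =>
    round.foldl (fun counts pair =>
      -- counts[pair[1]].append(pair[0]): key present on Pre_ inputs, so modify is exact
      counts.modify pair.2 [] (fun l => l ++ [pair.1])) counts) counts
  ((PySem.List.max? (counts.getD "red" []) (fun x => x)).getD 0,
   (PySem.List.max? (counts.getD "green" []) (fun x => x)).getD 0,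
   (PySem.List.max? (counts.getD "blue" []) (fun x => x)).getD 0)

-- ===== PRECONDITION & SPEC =====
-- Pre_ excludes inputs holding a colour other than red/green/blue, on which A (and B) raise KeyError.
def Pre_maxPerColourForRounds (rounds : List (List (Int × String))) : Prop :=
  (rounds.all (fun r => r.all (fun p => p.2 == "red" || p.2 == "green" || p.2 == "blue"))) = true
instance (rounds : List (List (Int × String))) : Decidable (Pre_maxPerColourForRounds rounds) := by unfold Pre_maxPerColourForRounds; infer_instance
def pvWitness_maxPerColourForRounds : (List (List (Int × String))) := [[(3, "red"), (2, "green")], [(5, "blue")]]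

def Spec_maxPerColourForRounds (rounds : List (List (Int × String))) (out : Int × Int × Int) : Prop := out = maxPerColourForRounds_alt rounds
instance (rounds : List (List (Int × String))) (out : Int × Int × Int) : Decidable (Spec_maxPerColourForRounds rounds out) := by unfold Spec_maxPerColourForRounds; infer_instance

-- ===== CLAIM (what is proved, stated in full; the proofs are below) =====
def Claim_equal_maxPerColourForRounds : Prop := ∀ (rounds : List (List (Int × String))), Dom_maxPerColourForRounds rounds → Pre_maxPerColourForRounds rounds → Spec_maxPerColourForRounds rounds (maxPerColourForRounds rounds)

-- ===== LEMMAS AND PROOFS =====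

-- A's inner update per colour is a running max over that colour's counts.
theorem pvA_fold (l : List (Int × String)) (d : PySem.Dict String Int) (c : String) :
    (l.foldl (fun m (p : Int × String) =>
        if m.getD p.2 0 < p.1 then m.insert p.2 p.1 else m) d).getD c 0
      = ((l.filter (fun p => p.2 == c)).map (·.1)).foldl max (d.getD c 0) := by
  induction l generalizing d with
  | nil => rfl
  | cons a t ih =>
    simp only [List.foldl_cons, List.filter_cons, ih]
    by_cases h : a.2 = c
    · subst h
      simp only [beq_self_eq_true, if_true, List.map_cons, List.foldl_cons]
      split_ifs with h2
      · rw [PySem.Dict.getD_insert_self]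
        congr 1
        omega
      · congr 1
        omega
    · have hne : c ≠ a.2 := fun hc => h hc.symm
      simp only [beq_iff_eq, h, if_false]
      split_ifs with h2
      · rw [PySem.Dict.getD_insert, if_neg hne]
      · rfl

-- B's loop collects exactly the counts of colour c (in order), appended to the seed.
theorem pvB_fold (l : List (Int × String)) (d : PySem.Dict String (List Int)) (c : String) :
    (l.foldl (fun m (p : Int × String) => m.modify p.2 [] (fun xs => xs ++ [p.1])) d).getD c []
      = d.getD c [] ++ ((l.filter (fun p => p.2 == c)).map (·.1)) := by
  induction l generalizing d with
  | nil => simp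
  | cons a t ih =>
    simp only [List.foldl_cons, ih, List.filter_cons]
    rw [PySem.Dict.getD_modify]
    by_cases h : a.2 = c
    · subst h
      simp [List.append_assoc]
    · have hne : c ≠ a.2 := fun hc => h hc.symm
      simp [beq_iff_eq, h, if_neg hne]

-- ===== VERDICT (by name: the statement is the Claim_ definition above) =====
theorem maxPerColourForRounds_spec : Claim_equal_maxPerColourForRounds := by
  intro rounds _ _
  show maxPerColourForRounds rounds = maxPerColourForRounds_alt rounds
  unfold maxPerColourForRounds maxPerColourForRounds_alt
  simp only [← List.foldl_flatten]
  rw [pvA_fold, pvA_fold, pvA_fold, pvB_fold, pvB_fold, pvB_fold]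
  have hred : (PySem.Dict.ofList [("red", ([0] : List Int)), ("green", [0]), ("blue", [0])]).getD "red" [] = [0] := by decide
  have hgreen : (PySem.Dict.ofList [("red", ([0] : List Int)), ("green", [0]), ("blue", [0])]).getD "green" [] = [0] := by decide
  have hblue : (PySem.Dict.ofList [("red", ([0] : List Int)), ("green", [0]), ("blue", [0])]).getD "blue" [] = [0] := by decide
  have hr0 : (PySem.Dict.ofList [("red", (0 : Int)), ("green", 0), ("blue", 0)]).getD "red" 0 = 0 := by decide
  have hg0 : (PySem.Dict.ofList [("red", (0 : Int)), ("green", 0), ("blue", 0)]).getD "green" 0 = 0 := by decide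
  have hb0 : (PySem.Dict.ofList [("red", (0 : Int)), ("green", 0), ("blue", 0)]).getD "blue" 0 = 0 := by decide
  rw [hred, hgreen, hblue, hr0, hg0, hb0]
  simp only [List.singleton_append, PySem.List.max?_id_cons, Option.getD_some]
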